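-- pv_equiv track=rewrite | github.com/banseok1216/Algorithm | 백준/Gold/23288. 주사위 굴리기 2/주사위 굴리기 2.py | c_dice
-- ===== SOURCE A (Python) =====
-- def c_dice(d, t):
--     tmp = [0 for i in range(6)]
--     if t == "E":  # 동쪽으로 굴리기
--         tmp[0], tmp[1], tmp[2], tmp[3], tmp[4], tmp[5] = d[4], d[1], d[5], d[3], d[2], d[0]
--     elif t == "W":  # 서쪽으로 굴리기
--         tmp[0], tmp[1], tmp[2], tmp[3], tmp[4], tmp[5] = d[5], d[1], d[4], d[3], d[0], d[2]
--     elif t == "S":  # 남쪽으로 굴리기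
--         tmp[0], tmp[1], tmp[2], tmp[3], tmp[4], tmp[5] = d[3], d[0], d[1], d[2], d[4], d[5]
--     elif t == "N":  # 북쪽으로 굴리기
--         tmp[0], tmp[1], tmp[2], tmp[3], tmp[4], tmp[5] = d[1], d[2], d[3], d[0], d[4], d[5]
--     elif t == "R":  # 시계 방향 회전
--         tmp[0], tmp[1], tmp[2], tmp[3], tmp[4], tmp[5] = d[0], d[5], d[2], d[4], d[1], d[3]
--     elif t == "L":  # 반시계 방향 회전
--         tmp[0], tmp[1], tmp[2], tmp[3], tmp[4], tmp[5] = d[0], d[4], d[2], d[5], d[3], d[1]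
--     return tmp
-- ===== SOURCE B (Python) =====
-- # Group decomposition: W/N/L are the inverses (= cubes) of E/S/R, so only three
-- # primitive rolls exist; each command expands to a word over {E,S,R} that is folded over d.
-- _EXPAND = {"E": "E", "W": "EEE", "S": "S", "N": "SSS", "R": "R", "L": "RRR"}
--
-- def c_dice(d, t):
--     word = _EXPAND.get(t)
--     if word is None:
--         return [0] * 6
--     for ch in word:
--         if ch == "E":
--             d = [d[4], d[1], d[5], d[3], d[2], d[0]]
--         elif ch == "S":
--             d = [d[3], d[0], d[1], d[2], d[4], d[5]]
--         else:  # "R"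
--             d = [d[0], d[5], d[2], d[4], d[1], d[3]]
--     return d
-- ===== Notes on version B (the rewrite author's own statement) =====
-- stated objective: alternative
-- what changed: B stores only the three primitive rolls E/S/R and derives W/N/L as their cubes (inverses), folding the primitive step over an expansion word instead of A's six hard-coded permutation branches.
import Mathlib
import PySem

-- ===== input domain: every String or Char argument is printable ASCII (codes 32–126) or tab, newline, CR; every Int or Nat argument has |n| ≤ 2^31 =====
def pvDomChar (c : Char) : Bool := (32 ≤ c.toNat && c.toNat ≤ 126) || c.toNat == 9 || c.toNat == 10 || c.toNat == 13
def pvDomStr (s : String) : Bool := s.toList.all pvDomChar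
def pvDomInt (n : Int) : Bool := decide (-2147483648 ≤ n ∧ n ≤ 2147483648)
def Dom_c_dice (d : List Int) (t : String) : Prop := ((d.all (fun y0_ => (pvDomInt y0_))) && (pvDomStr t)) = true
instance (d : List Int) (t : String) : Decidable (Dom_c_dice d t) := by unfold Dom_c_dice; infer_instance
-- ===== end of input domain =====

-- B keeps only the three primitive rolls E/S/R and derives W/N/L as their cubes, folding over an expansion word (objective: alternative).

-- ===== PORT A =====
-- d[i] is in-range on every input admitted by Pre_c_dice (Python raises IndexError otherwise), so the .getD 0 default is never used there.
def c_dice (d : List Int) (t : String) : List Int :=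
  let g : Int → Int := fun i => (PySem.List.pyGet? d i).getD 0
  let tmp : List Int := [0, 0, 0, 0, 0, 0]
  if t = "E" then [g 4, g 1, g 5, g 3, g 2, g 0]
  else if t = "W" then [g 5, g 1, g 4, g 3, g 0, g 2]
  else if t = "S" then [g 3, g 0, g 1, g 2, g 4, g 5]
  else if t = "N" then [g 1, g 2, g 3, g 0, g 4, g 5]
  else if t = "R" then [g 0, g 5, g 2, g 4, g 1, g 3]
  else if t = "L" then [g 0, g 4, g 2, g 5, g 3, g 1]
  else tmp

-- ===== PORT B =====
def c_dice_expand : PySem.Dict String String :=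
  PySem.Dict.ofList [("E", "E"), ("W", "EEE"), ("S", "S"), ("N", "SSS"), ("R", "R"), ("L", "RRR")]

-- one primitive roll, applied per character of the expansion word
def c_dice_step (d : List Int) (ch : Char) : List Int :=
  let g : Int → Int := fun i => (PySem.List.pyGet? d i).getD 0
  if ch = 'E' then [g 4, g 1, g 5, g 3, g 2, g 0]
  else if ch = 'S' then [g 3, g 0, g 1, g 2, g 4, g 5]
  else [g 0, g 5, g 2, g 4, g 1, g 3]

def c_dice_alt (d : List Int) (t : String) : List Int :=
  match PySem.Dict.get? c_dice_expand t with
  | none => [0, 0, 0, 0, 0, 0]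
  | some word => word.toList.foldl c_dice_step d

-- ===== PRECONDITION & SPEC =====
-- Pre_ excludes only inputs where Python A raises IndexError: a valid direction letter with fewer than 6 faces.
def Pre_c_dice (d : List Int) (t : String) : Prop :=
  (t = "E" ∨ t = "W" ∨ t = "S" ∨ t = "N" ∨ t = "R" ∨ t = "L") → 6 ≤ d.length
instance (d : List Int) (t : String) : Decidable (Pre_c_dice d t) := by unfold Pre_c_dice; infer_instance

def pvWitness_c_dice : List Int × String := ([1, 2, 3, 4, 5, 6], "E")

def Spec_c_dice (d : List Int) (t : String) (out : List Int) : Prop := out = c_dice_alt d t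
instance (d : List Int) (t : String) (out : List Int) : Decidable (Spec_c_dice d t out) := by unfold Spec_c_dice; infer_instance

-- ===== CLAIM (what is proved, stated in full; the proofs are below) =====
def Claim_equal_c_dice : Prop := ∀ (d : List Int) (t : String), Dom_c_dice d t → Pre_c_dice d t → Spec_c_dice d t (c_dice d t)

-- ===== LEMMAS AND PROOFS =====
theorem expand_E : PySem.Dict.get? c_dice_expand "E" = some "E" := by decide
theorem expand_W : PySem.Dict.get? c_dice_expand "W" = some "EEE" := by decide
theorem expand_S : PySem.Dict.get? c_dice_expand "S" = some "S" := by decide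
theorem expand_N : PySem.Dict.get? c_dice_expand "N" = some "SSS" := by decide
theorem expand_R : PySem.Dict.get? c_dice_expand "R" = some "R" := by decide
theorem expand_L : PySem.Dict.get? c_dice_expand "L" = some "RRR" := by decide

theorem expand_none (t : String) (hE : t ≠ "E") (hW : t ≠ "W") (hS : t ≠ "S")
    (hN : t ≠ "N") (hR : t ≠ "R") (hL : t ≠ "L") :
    PySem.Dict.get? c_dice_expand t = none := by
  have eE : ("E" == t) = false := by simp [Ne.symm hE]
  have eW : ("W" == t) = false := by simp [Ne.symm hW]
  have eS : ("S" == t) = false := by simp [Ne.symm hS]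
  have eN : ("N" == t) = false := by simp [Ne.symm hN]
  have eR : ("R" == t) = false := by simp [Ne.symm hR]
  have eL : ("L" == t) = false := by simp [Ne.symm hL]
  simp [c_dice_expand, PySem.Dict.get?, PySem.Dict.ofList, PySem.Dict.update,
    PySem.Dict.insert, PySem.Dict.empty, PySem.Dict.contains,
    List.find?, eE, eW, eS, eN, eR, eL]

-- on a list with ≥ 6 elements, both sides compute to concrete selections
theorem c_dice_long (a b c e f g : Int) (rest : List Int) (t : String)
    (ht : t = "E" ∨ t = "W" ∨ t = "S" ∨ t = "N" ∨ t = "R" ∨ t = "L") :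
    c_dice (a :: b :: c :: e :: f :: g :: rest) t
      = c_dice_alt (a :: b :: c :: e :: f :: g :: rest) t := by
  rcases ht with rfl | rfl | rfl | rfl | rfl | rfl
  · rw [c_dice_alt, expand_E]; simp [c_dice, c_dice_step, PySem.List.pyGet?, PySem.List.pyIdx?]
  · rw [c_dice_alt, expand_W]; simp [c_dice, c_dice_step, PySem.List.pyGet?, PySem.List.pyIdx?]
  · rw [c_dice_alt, expand_S]; simp [c_dice, c_dice_step, PySem.List.pyGet?, PySem.List.pyIdx?]
  · rw [c_dice_alt, expand_N]; simp [c_dice, c_dice_step, PySem.List.pyGet?, PySem.List.pyIdx?]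
  · rw [c_dice_alt, expand_R]; simp [c_dice, c_dice_step, PySem.List.pyGet?, PySem.List.pyIdx?]
  · rw [c_dice_alt, expand_L]; simp [c_dice, c_dice_step, PySem.List.pyGet?, PySem.List.pyIdx?]

-- ===== VERDICT (by name: the statement is the Claim_ definition above) =====
theorem c_dice_spec : Claim_equal_c_dice := by
  intro d t _ hpre
  unfold Spec_c_dice
  by_cases ht : t = "E" ∨ t = "W" ∨ t = "S" ∨ t = "N" ∨ t = "R" ∨ t = "L"
  · have hlen : 6 ≤ d.length := hpre ht
    match d, hlen with
    | a :: b :: c :: e :: f :: g :: rest, _ => exact c_dice_long a b c e f g rest t ht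
  · push_neg at ht
    obtain ⟨hE, hW, hS, hN, hR, hL⟩ := ht
    rw [c_dice_alt, expand_none t hE hW hS hN hR hL]
    simp [c_dice, hE, hW, hS, hN, hR, hL]
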